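-- pv_equiv track=rewrite | github.com/asxziill/- | B4_do1.py | format_missing_pins_message
-- ===== SOURCE A (Python) =====
-- def format_missing_pins_message(remaining_numbers):
--     # 检查是否有剩余的编号
--     if not remaining_numbers:
--         return "没有引脚缺失"
--
--     # 分离上排和下排的引脚编号
--     upper_row_numbers = [num for num in remaining_numbers if num <= 24]
--     lower_row_numbers = [num - 24 for num in remaining_numbers if num > 24]
--
--     # 格式化消息
--     messages = []
--     if upper_row_numbers:
--         upper_row_str = ', '.join(str(num) for num in sorted(upper_row_numbers))
--         messages.append('上排第 ' + upper_row_str + ' 根引脚缺失')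
--
--     if lower_row_numbers:
--         lower_row_str = ', '.join(str(num) for num in sorted(lower_row_numbers))
--         messages.append('下排第 ' + lower_row_str + ' 根引脚缺失')
--
--     return '\n'.join(messages)
-- ===== SOURCE B (Python) =====
-- def format_missing_pins_message(remaining_numbers):
--     if not remaining_numbers:
--         return "没有引脚缺失"
--
--     # one sort of the whole list, then a single fold that builds the final
--     # comma-joined row strings directly in two string accumulators: no row
--     # lists, no per-row sort, no join() calls anywhere
--     upper_str = ''
--     lower_str = ''
--     for num in sorted(remaining_numbers):
--         if num <= 24:
--             if upper_str:
--                 upper_str += ', '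
--             upper_str += str(num)
--         else:
--             if lower_str:
--                 lower_str += ', '
--             lower_str += str(num - 24)
--
--     result = ''
--     if upper_str:
--         result = '上排第 ' + upper_str + ' 根引脚缺失'
--     if lower_str:
--         result = (result + '\n' if result else '') + '下排第 ' + lower_str + ' 根引脚缺失'
--     return result
-- ===== Notes on version B (the rewrite author's own statement) =====
-- stated objective: alternative
-- what changed: B never materialises the two row lists or calls join/sorted per row: it sorts the whole list once and a single fold builds the final comma-joined row strings directly in two string accumulators, assembling the message by incremental concatenation instead of A's filter+sort+map+join pipeline per row.
import Mathlib
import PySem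

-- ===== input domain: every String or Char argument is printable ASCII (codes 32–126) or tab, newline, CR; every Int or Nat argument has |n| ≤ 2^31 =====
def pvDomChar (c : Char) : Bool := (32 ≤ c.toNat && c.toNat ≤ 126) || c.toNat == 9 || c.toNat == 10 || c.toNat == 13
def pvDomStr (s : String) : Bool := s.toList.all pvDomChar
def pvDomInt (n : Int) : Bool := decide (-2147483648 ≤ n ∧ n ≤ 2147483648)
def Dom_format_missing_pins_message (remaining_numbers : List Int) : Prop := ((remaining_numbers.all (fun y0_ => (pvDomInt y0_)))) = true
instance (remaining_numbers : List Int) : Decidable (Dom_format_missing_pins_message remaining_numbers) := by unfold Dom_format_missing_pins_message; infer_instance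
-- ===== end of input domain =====

-- B sorts the whole list once and one fold builds the final comma-joined row strings
-- directly in two string accumulators (no row lists, no per-row sort, no join);
-- alternative decomposition, same asymptotic cost.

-- ===== PORT A =====
def format_missing_pins_message (remaining_numbers : List Int) : String :=
  if remaining_numbers = [] then "没有引脚缺失"
  else
    let upper_row_numbers := remaining_numbers.filter (fun num => num ≤ 24)
    let lower_row_numbers := (remaining_numbers.filter (fun num => num > 24)).map (fun num => num - 24)
    let messages : List String := []
    let messages := if upper_row_numbers = [] then messages else
      messages ++ ["上排第 " ++ PySem.Str.join ", " ((PySem.List.sorted upper_row_numbers (fun x => x) false).map PySem.Int.toStr) ++ " 根引脚缺失"]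
    let messages := if lower_row_numbers = [] then messages else
      messages ++ ["下排第 " ++ PySem.Str.join ", " ((PySem.List.sorted lower_row_numbers (fun x => x) false).map PySem.Int.toStr) ++ " 根引脚缺失"]
    PySem.Str.join "\n" messages

-- ===== PORT B =====
-- "if acc: acc += ', '; acc += str(x)" of Source B (the in-place += accumulation step)
def pvAccRow (acc : String) (x : Int) : String :=
  (if acc = "" then acc else acc ++ ", ") ++ PySem.Int.toStr x

-- the single classifying loop of Source B, carrying the two string accumulators
def pvPinLoop : List Int → String × String → String × String
  | [], st => st
  | n :: t, st =>
    if n ≤ 24 then pvPinLoop t (pvAccRow st.1 n, st.2)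
    else pvPinLoop t (st.1, pvAccRow st.2 (n - 24))

def format_missing_pins_message_alt (remaining_numbers : List Int) : String :=
  if remaining_numbers = [] then "没有引脚缺失"
  else
    let st := pvPinLoop (PySem.List.sorted remaining_numbers (fun x => x) false) ("", "")
    let result := ""
    let result := if st.1 = "" then result else "上排第 " ++ st.1 ++ " 根引脚缺失"
    let result := if st.2 = "" then result else
      (if result = "" then "" else result ++ "\n") ++ ("下排第 " ++ st.2 ++ " 根引脚缺失")
    result

-- ===== PRECONDITION & SPEC =====
def Spec_format_missing_pins_message (remaining_numbers : List Int) (out : String) : Prop := out = format_missing_pins_message_alt remaining_numbers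
instance (remaining_numbers : List Int) (out : String) : Decidable (Spec_format_missing_pins_message remaining_numbers out) := by unfold Spec_format_missing_pins_message; infer_instance

-- ===== CLAIM (what is proved, stated in full; the proofs are below) =====
def Claim_equal_format_missing_pins_message : Prop := ∀ (remaining_numbers : List Int), Dom_format_missing_pins_message remaining_numbers → Spec_format_missing_pins_message remaining_numbers (format_missing_pins_message remaining_numbers)

-- ===== LEMMAS AND PROOFS =====

-- str(n) is never the empty string
theorem pv_toDigitsCore_len_ge (fuel : Nat) : ∀ (n : Nat) (l : List Char),
    l.length ≤ (Nat.toDigitsCore 10 fuel n l).length := by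
  induction fuel with
  | zero => intro n l; simp [Nat.toDigitsCore]
  | succ f ih =>
    intro n l
    simp only [Nat.toDigitsCore]
    split
    · simp
    · exact le_trans (by simp) (ih (n / 10) (Nat.digitChar (n % 10) :: l))

theorem pv_toDigitsCore_len_succ (f n : Nat) (l : List Char) :
    l.length + 1 ≤ (Nat.toDigitsCore 10 (f + 1) n l).length := by
  rw [Nat.toDigitsCore]
  split
  · simp
  · exact le_trans (by simp) (pv_toDigitsCore_len_ge f (n / 10) (Nat.digitChar (n % 10) :: l))

theorem pv_toDigits_ne_nil (n : Nat) : Nat.toDigits 10 n ≠ [] := by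
  intro h
  have hl : (Nat.toDigits 10 n).length = 0 := by simp [h]
  have := pv_toDigitsCore_len_succ n n []
  unfold Nat.toDigits at hl
  simp at this
  omega

theorem pv_toChars_ne_nil (n : Int) : PySem.Int.toChars n ≠ [] := by
  unfold PySem.Int.toChars
  split
  · simp
  · exact pv_toDigits_ne_nil _

theorem pv_toStr_ne_empty (n : Int) : PySem.Int.toStr n ≠ "" := by
  intro h
  have := congrArg String.toList h
  rw [PySem.Int.toList_toStr] at this
  exact pv_toChars_ne_nil n (by simpa using this)

-- the trailing chars ', x1, x2, …' contributed by a list of pins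
def pvTail (parts : List Int) : List Char :=
  (parts.map (fun n => [',', ' '] ++ PySem.Int.toChars n)).flatten

theorem pv_foldl_ne (parts : List Int) : ∀ (acc : String), acc ≠ "" →
    (List.foldl pvAccRow acc parts).toList = acc.toList ++ pvTail parts := by
  induction parts with
  | nil => intro acc _; simp [pvTail]
  | cons x xs ih =>
    intro acc hacc
    have hstep : (pvAccRow acc x).toList = acc.toList ++ ([',', ' '] ++ PySem.Int.toChars x) := by
      simp [pvAccRow, if_neg hacc, PySem.Int.toList_toStr]
    have hne : pvAccRow acc x ≠ "" := by
      intro h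
      have := congrArg String.toList h
      rw [hstep] at this
      have : acc.toList = [] := by
        cases hcl : acc.toList <;> simp_all
      exact hacc (String.toList_inj.mp (by simpa using this))
    simp only [List.foldl_cons]
    rw [ih _ hne, hstep, pvTail]
    simp [pvTail]

theorem pv_join_chars (x : Int) (xs : List Int) :
    PySem.Chars.join [',', ' '] (((x :: xs).map PySem.Int.toStr).map String.toList) =
      PySem.Int.toChars x ++ pvTail xs := by
  induction xs generalizing x with
  | nil =>
    simp only [List.map_cons, List.map_nil]
    rw [PySem.Chars.join_singleton]
    simp [pvTail, PySem.Int.toList_toStr]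
  | cons y ys ih =>
    simp only [List.map_cons] at ih ⊢
    rw [PySem.Chars.join_cons_cons, ih y]
    simp [pvTail, PySem.Int.toList_toStr]

theorem pv_foldl_join (parts : List Int) :
    List.foldl pvAccRow "" parts = PySem.Str.join ", " (parts.map PySem.Int.toStr) := by
  apply String.toList_inj.mp
  rw [PySem.Str.toList_join]
  cases parts with
  | nil => simp [PySem.Chars.join]; decide
  | cons x xs =>
    have hsep : ", ".toList = [',', ' '] := by decide
    rw [hsep, pv_join_chars]
    simp only [List.foldl_cons]
    have h0 : pvAccRow "" x = PySem.Int.toStr x := by simp [pvAccRow]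
    rw [h0, pv_foldl_ne xs _ (pv_toStr_ne_empty x), PySem.Int.toList_toStr]

theorem pv_foldl_empty_iff (parts : List Int) :
    List.foldl pvAccRow "" parts = "" ↔ parts = [] := by
  cases parts with
  | nil => simp
  | cons x xs =>
    simp only [List.foldl_cons]
    constructor
    · intro hcontra
      rw [show pvAccRow "" x = PySem.Int.toStr x by simp [pvAccRow]] at hcontra
      have hlist := congrArg String.toList hcontra
      rw [pv_foldl_ne xs _ (pv_toStr_ne_empty x), PySem.Int.toList_toStr] at hlist
      simp at hlist
      exact (pv_toChars_ne_nil x hlist.1).elim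
    · intro hcontra; simp at hcontra

theorem pv_loop_spec (s : List Int) : ∀ (u l : String),
    pvPinLoop s (u, l) =
      (List.foldl pvAccRow u (s.filter (fun num => num ≤ 24)),
       List.foldl pvAccRow l ((s.filter (fun num => num > 24)).map (fun num => num - 24))) := by
  induction s with
  | nil => intro u l; simp [pvPinLoop]
  | cons n t ih =>
    intro u l
    by_cases h : n ≤ 24
    · simp [pvPinLoop, h, ih, show ¬ (24 < n) by omega]
    · simp [pvPinLoop, h, ih, show 24 < n by omega]

theorem pv_upper_comm (xs : List Int) :
    PySem.List.sorted (xs.filter (fun num => decide (num ≤ 24))) (fun x => x) false =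
      (PySem.List.sorted xs (fun x => x) false).filter (fun num => decide (num ≤ 24)) := by
  apply PySem.List.sorted_id_eq_of_perm_of_pairwise
  · exact (PySem.List.sorted_perm xs (fun x => x) false).filter _
  · exact (PySem.List.sorted_pairwise xs (fun x => x)).filter _

theorem pv_lower_comm (xs : List Int) :
    PySem.List.sorted ((xs.filter (fun num => decide (num > 24))).map (fun num => num - 24)) (fun x => x) false =
      ((PySem.List.sorted xs (fun x => x) false).filter (fun num => decide (num > 24))).map (fun num => num - 24) := by
  apply PySem.List.sorted_id_eq_of_perm_of_pairwise
  · exact (((PySem.List.sorted_perm xs (fun x => x) false).filter _).map _)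
  · exact List.Pairwise.map _ (fun a b (h : a ≤ b) => by omega)
      ((PySem.List.sorted_pairwise xs (fun x => x)).filter _)

theorem pv_join_singleton (m : String) : PySem.Str.join "\n" [m] = m := by
  apply String.toList_inj.mp
  rw [PySem.Str.toList_join]
  simp only [List.map_cons, List.map_nil]
  rw [PySem.Chars.join_singleton]

theorem pv_join_pair (m1 m2 : String) : PySem.Str.join "\n" [m1, m2] = m1 ++ "\n" ++ m2 := by
  apply String.toList_inj.mp
  rw [PySem.Str.toList_join]
  simp only [List.map_cons, List.map_nil]
  rw [PySem.Chars.join_cons_cons, PySem.Chars.join_singleton]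
  simp

-- ===== VERDICT (by name: the statement is the Claim_ definition above) =====
theorem format_missing_pins_message_spec : Claim_equal_format_missing_pins_message := by
  intro rn _
  unfold Spec_format_missing_pins_message format_missing_pins_message format_missing_pins_message_alt
  by_cases h : rn = []
  · simp [h]
  · simp only [if_neg h, pv_loop_spec, pv_foldl_join]
    have hsnil : PySem.List.sorted rn (fun x => x) false ≠ [] := by
      rw [Ne, PySem.List.sorted_eq_nil_iff]; exact h
    rw [← pv_upper_comm, ← pv_lower_comm]
    have hU : (rn.filter (fun num => decide (num ≤ 24)) = []) ↔
        (PySem.Str.join ", " ((PySem.List.sorted (rn.filter (fun num => decide (num ≤ 24))) (fun x => x) false).map PySem.Int.toStr) = "") := by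
      rw [← pv_foldl_join, pv_foldl_empty_iff, PySem.List.sorted_eq_nil_iff]
    have hL : ((rn.filter (fun num => decide (num > 24))).map (fun num => num - 24) = []) ↔
        (PySem.Str.join ", " ((PySem.List.sorted ((rn.filter (fun num => decide (num > 24))).map (fun num => num - 24)) (fun x => x) false).map PySem.Int.toStr) = "") := by
      rw [← pv_foldl_join, pv_foldl_empty_iff, PySem.List.sorted_eq_nil_iff]
    set sU := PySem.Str.join ", " ((PySem.List.sorted (rn.filter (fun num => decide (num ≤ 24))) (fun x => x) false).map PySem.Int.toStr) with hsU
    set sL := PySem.Str.join ", " ((PySem.List.sorted ((rn.filter (fun num => decide (num > 24))).map (fun num => num - 24)) (fun x => x) false).map PySem.Int.toStr) with hsL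
    by_cases hu : rn.filter (fun num => decide (num ≤ 24)) = []
    · by_cases hl : (rn.filter (fun num => decide (num > 24))).map (fun num => num - 24) = []
      · -- impossible: rn nonempty
        exfalso
        obtain ⟨n, hn⟩ := List.exists_mem_of_ne_nil rn h
        by_cases h24 : n ≤ 24
        · have hmem : n ∈ rn.filter (fun num => decide (num ≤ 24)) := by
            rw [List.mem_filter]; exact ⟨hn, by simpa⟩
          rw [hu] at hmem; simp at hmem
        · have hmem : n ∈ rn.filter (fun num => decide (num > 24)) := by
            rw [List.mem_filter]; refine ⟨hn, ?_⟩; simp; omega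
          have hmem2 : (n - 24) ∈ (rn.filter (fun num => decide (num > 24))).map (fun num => num - 24) :=
            List.mem_map.mpr ⟨n, hmem, rfl⟩
          rw [hl] at hmem2; simp at hmem2
      · have hsu : sU = "" := hU.mp hu
        have hsl : sL ≠ "" := fun hc => hl (hL.mpr hc)
        simp only [if_pos hu, if_neg hl, if_pos hsu, if_neg hsl, List.nil_append,
          pv_join_singleton, if_true]
        apply String.toList_inj.mp
        simp
    · have hsu : sU ≠ "" := fun hc => hu (hU.mpr hc)
      have hm1 : "上排第 " ++ sU ++ " 根引脚缺失" ≠ "" := by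
        intro hc
        have := congrArg String.toList hc
        simp at this
      by_cases hl : (rn.filter (fun num => decide (num > 24))).map (fun num => num - 24) = []
      · have hsl : sL = "" := hL.mp hl
        simp only [if_neg hu, if_pos hl, if_neg hsu, if_pos hsl, List.nil_append,
          pv_join_singleton]
      · have hsl : sL ≠ "" := fun hc => hl (hL.mpr hc)
        simp only [if_neg hu, if_neg hl, if_neg hsu, if_neg hsl, if_neg hm1,
          List.nil_append, List.singleton_append]
        rw [pv_join_pair]
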